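-- pv_equiv track=rewrite | github.com/KarlRombauts/contrast-one-templates | src/tools/analyze_variants.py | extract_string_literals
-- ===== SOURCE A (Python) =====
-- def extract_string_literals(body: str) -> list:
--     """Extract all Pascal string literals from a body."""
--     results = []
--     i = 0
--     while i < len(body):
--         if body[i] == "'":
--             j = i + 1
--             lit = ""
--             while j < len(body):
--                 if body[j] == "'":
--                     if j + 1 < len(body) and body[j + 1] == "'":
--                         lit += "'"
--                         j += 2
--                     else:
--                         j += 1
--                         break
--                 else:
--                     lit += body[j]
--                     j += 1
--             results.append(lit)
--             i = j
--         else: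
--             i += 1
--     return results
-- ===== SOURCE B (Python) =====
-- def extract_string_literals(body: str) -> list:
--     """Extract all Pascal string literals from a body (split-based, one pass over the quote-separated segments)."""
--     segs = body.split("'")
--     results = []
--     i = 1
--     while i < len(segs):
--         parts = [segs[i]]
--         # a blank segment with a further segment after it marks an escaped doubled quote inside the literal
--         while i + 1 < len(segs) and segs[i + 1] == "" and i + 2 < len(segs):
--             parts.append(segs[i + 2])
--             i += 2
--         results.append("'".join(parts))
--         i += 2
--     return results
-- ===== Notes on version B (the rewrite author's own statement) =====
-- stated objective: faster
-- what changed: Replaces A's nested character-by-character while-loop scan with a single split of the body on the quote character followed by a walk over the segment list that rejoins escaped quote pairs and emits each literal with a join.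
import Mathlib
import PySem

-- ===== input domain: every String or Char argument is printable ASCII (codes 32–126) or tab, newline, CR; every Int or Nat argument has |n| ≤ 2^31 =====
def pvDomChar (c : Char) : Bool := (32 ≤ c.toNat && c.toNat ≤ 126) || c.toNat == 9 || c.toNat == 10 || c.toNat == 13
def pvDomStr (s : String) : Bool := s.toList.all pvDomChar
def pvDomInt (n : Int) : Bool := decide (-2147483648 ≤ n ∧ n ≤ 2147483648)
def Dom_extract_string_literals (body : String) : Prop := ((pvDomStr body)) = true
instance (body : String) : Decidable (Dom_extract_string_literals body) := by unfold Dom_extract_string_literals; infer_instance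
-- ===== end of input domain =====

-- B replaces A's nested char-by-char scan with split-on-quote + a walk over the segments (measured faster by a constant factor).

-- ===== PORT A =====
-- inner while loop of A: scanning from j (the chars after the opening quote), building lit;
-- returns (lit, the chars remaining after the literal ends)
def pvAInner : List Char → List Char → (List Char × List Char)
  | [], lit => (lit, [])
  | '\'' :: rest, lit =>
      match rest with
      | '\'' :: rest2 => pvAInner rest2 (lit ++ ['\''])
      | _ => (lit, rest)
  | c :: rest, lit => pvAInner rest (lit ++ [c])

theorem pvAInner_len (l lit : List Char) : (pvAInner l lit).2.length ≤ l.length := by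
  fun_induction pvAInner l lit <;> simp_all <;> omega

-- outer while loop of A: skip until a quote, then read one literal and continue after it
def pvAOuter : List Char → List String
  | [] => []
  | c :: rest =>
      if c = '\'' then
        String.ofList (pvAInner rest []).1 :: pvAOuter (pvAInner rest []).2
      else pvAOuter rest
termination_by l => l.length
decreasing_by
  · have := pvAInner_len rest []; simp; omega
  · simp

def extract_string_literals (body : String) : List String := pvAOuter body.toList

-- ===== PORT B =====
-- inner while loop of B: while the next segment is blank AND another segment follows
-- (an escaped '' inside the literal), absorb the segment after it into parts
def pvBInner : List (List Char) → List (List Char) → (List (List Char) × List (List Char))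
  | parts, [] :: u :: rest => pvBInner (parts ++ [u]) rest
  | parts, rest => (parts, rest)

theorem pvBInner_len (parts rem : List (List Char)) :
    (pvBInner parts rem).2.length ≤ rem.length := by
  (fun_induction pvBInner parts rem <;> simp_all); omega

-- outer while loop of B over the remaining segments (i, i+2 jumps become suffixes)
def pvBOuter : List (List Char) → List String
  | [] => []
  | s :: rest =>
      String.ofList (PySem.Chars.join ['\''] (pvBInner [s] rest).1)
        :: pvBOuter ((pvBInner [s] rest).2.drop 1)
termination_by l => l.length
decreasing_by have := pvBInner_len [s] rest; simp; omega

def extract_string_literals_alt (body : String) : List String :=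
  pvBOuter ((PySem.Chars.splitOn body.toList ['\'']).drop 1)

-- ===== PRECONDITION & SPEC =====
def Spec_extract_string_literals (body : String) (out : List String) : Prop := out = extract_string_literals_alt body
instance (body : String) (out : List String) : Decidable (Spec_extract_string_literals body out) := by unfold Spec_extract_string_literals; infer_instance

-- ===== CLAIM (what is proved, stated in full; the proofs are below) =====
def Claim_equal_extract_string_literals : Prop := ∀ (body : String), Dom_extract_string_literals body → Spec_extract_string_literals body (extract_string_literals body)

-- ===== LEMMAS AND PROOFS =====

theorem pvSplit_ne_nil (r : List Char) : r.splitOn '\'' ≠ [] := by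
  unfold List.splitOn; exact List.splitOnP_ne_nil _ _

theorem pvSplit_cons_q (r : List Char) : ('\'' :: r).splitOn '\'' = [] :: r.splitOn '\'' := by
  simp [List.splitOn, List.splitOnP_cons]

theorem pvSplit_cons_ne (c : Char) (hc : c ≠ '\'') (r a : List Char) (t : List (List Char))
    (h : r.splitOn '\'' = a :: t) : (c :: r).splitOn '\'' = (c :: a) :: t := by
  simp only [List.splitOn, List.splitOnP_cons] at *
  rw [if_neg (by simp [hc]), h]
  simp

-- PySem's splitOn on a single-char separator is Lean's List.splitOn
theorem pvGo_eq (l : List Char) : ∀ (fuel : Nat) (cur : List Char) (acc : List (List Char)),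
    l.length ≤ fuel →
    PySem.Chars.splitOn.go ['\''] fuel l cur acc
      = acc.reverse ++ (l.splitOn '\'').modifyHead (cur.reverse ++ ·) := by
  induction l with
  | nil =>
      intro fuel cur acc _
      cases fuel <;> simp [PySem.Chars.splitOn.go, List.splitOn]
  | cons c rest ih =>
      intro fuel cur acc hf
      cases fuel with
      | zero => simp at hf
      | succ n =>
        have hn : rest.length ≤ n := by simpa using hf
        simp only [PySem.Chars.splitOn.go]
        by_cases hc : c = '\''
        · subst hc
          rw [if_pos (by simp [List.isPrefixOf])]
          have hd : List.drop ['\''].length ('\'' :: rest) = rest := rfl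
          rw [hd, ih n [] (cur.reverse :: acc) hn, pvSplit_cons_q]
          cases h : rest.splitOn '\'' with
          | nil => exact absurd h (pvSplit_ne_nil rest)
          | cons a t => simp
        · rw [if_neg (by simp [List.isPrefixOf]; exact fun h => hc h.symm)]
          rw [ih n (c :: cur) acc hn]
          cases h : rest.splitOn '\'' with
          | nil => exact absurd h (pvSplit_ne_nil rest)
          | cons a t => rw [pvSplit_cons_ne c hc rest a t h]; simp

theorem pvSplitOn_eq (l : List Char) : PySem.Chars.splitOn l ['\''] = l.splitOn '\'' := by
  unfold PySem.Chars.splitOn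
  rw [pvGo_eq l (l.length + 1) [] [] (by omega)]
  cases h : l.splitOn '\'' with
  | nil => exact absurd h (pvSplit_ne_nil l)
  | cons a t => simp

-- the content/rest of one literal, cons-shaped (same recursion as pvAInner without the accumulator)
def pvLit : List Char → (List Char × List Char)
  | [] => ([], [])
  | '\'' :: rest =>
      match rest with
      | '\'' :: rest2 => ('\'' :: (pvLit rest2).1, (pvLit rest2).2)
      | _ => ([], rest)
  | c :: rest => (c :: (pvLit rest).1, (pvLit rest).2)

theorem pvAInner_eq (l lit : List Char) :
    pvAInner l lit = (lit ++ (pvLit l).1, (pvLit l).2) := by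
  fun_induction pvAInner l lit <;> simp_all [pvLit]

-- intercalate facts used to track B's parts accumulator
theorem pvIc_cons₂ (a b : List Char) (t : List (List Char)) :
    List.intercalate ['\''] (a :: b :: t) = a ++ ['\''] ++ List.intercalate ['\''] (b :: t) := by
  simp [List.intercalate, List.intersperse]

theorem pvJ_snoc_append (xs : List (List Char)) (a b : List Char) :
    List.intercalate ['\''] (xs ++ [a ++ b]) = List.intercalate ['\''] (xs ++ [a]) ++ b := by
  induction xs with
  | nil => simp [List.intercalate]
  | cons x xs ih =>
      cases xs with
      | nil => simp [List.intercalate]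
      | cons y ys =>
          simp only [List.cons_append, pvIc_cons₂]
          rw [List.cons_append, List.cons_append] at ih
          simp [ih]

theorem pvJ_snoc_nil (xs : List (List Char)) (h : xs ≠ []) :
    List.intercalate ['\''] (xs ++ [[]]) = List.intercalate ['\''] xs ++ ['\''] := by
  induction xs with
  | nil => simp at h
  | cons x l ih =>
      cases l with
      | nil => simp [List.intercalate]
      | cons y ys =>
          have hih := ih (by simp)
          simp only [List.cons_append] at hih ⊢
          rw [pvIc_cons₂, pvIc_cons₂ x y ys, hih]
          simp

-- the central correspondence: B's inner walk over the split segments computes the same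
-- literal (joined back with quotes) and leaves segments that are the split of A's remaining chars
theorem pvBInner_spec (l : List Char) : ∀ (parts0 : List (List Char)) (pre : List Char),
    (List.intercalate ['\''] ((pvBInner (parts0 ++ [pre ++ (l.splitOn '\'').headI]) ((l.splitOn '\'').tail)).1)
        = List.intercalate ['\''] (parts0 ++ [pre]) ++ (pvLit l).1)
    ∧ (((pvBInner (parts0 ++ [pre ++ (l.splitOn '\'').headI]) ((l.splitOn '\'').tail)).2 = []
          ∧ (pvLit l).2 = [])
       ∨ (pvBInner (parts0 ++ [pre ++ (l.splitOn '\'').headI]) ((l.splitOn '\'').tail)).2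
          = (pvLit l).2.splitOn '\'') := by
  fun_induction pvLit l with
  | case1 =>
      intro parts0 pre
      simp [List.splitOn, pvBInner]
  | case2 rest2 ih =>
      -- l = '\'' :: '\'' :: rest2 : escaped quote inside the literal
      intro parts0 pre
      cases hsp : rest2.splitOn '\'' with
      | nil => exact absurd hsp (pvSplit_ne_nil rest2)
      | cons a t =>
          have hs : ('\'' :: '\'' :: rest2).splitOn '\'' = [] :: [] :: a :: t := by
            rw [pvSplit_cons_q, pvSplit_cons_q, hsp]
          rw [hs]
          simp only [List.headI, List.tail_cons, List.append_nil]
          have hstep : pvBInner (parts0 ++ [pre]) ([] :: a :: t)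
              = pvBInner ((parts0 ++ [pre]) ++ [a]) t := by simp only [pvBInner]
          rw [hstep]
          have hih := ih (parts0 ++ [pre]) []
          rw [hsp] at hih
          simp only [List.headI, List.tail_cons, List.nil_append] at hih
          refine ⟨?_, ?_⟩
          · rw [hih.1, pvJ_snoc_nil (parts0 ++ [pre]) (by simp)]
            simp
          · simpa using hih.2
  | case3 rest hne =>
      -- l = '\'' :: rest where rest does not start with a quote: terminator or end of body
      intro parts0 pre
      cases rest with
      | nil =>
          simp [List.splitOn, pvBInner]
      | cons c2 r2 =>
          have hc2 : c2 ≠ '\'' := fun h => hne r2 (by rw [h])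
          cases hsp : r2.splitOn '\'' with
          | nil => exact absurd hsp (pvSplit_ne_nil r2)
          | cons a t =>
              have hs2 : (c2 :: r2).splitOn '\'' = (c2 :: a) :: t :=
                pvSplit_cons_ne c2 hc2 r2 a t hsp
              have hs : ('\'' :: c2 :: r2).splitOn '\'' = [] :: (c2 :: a) :: t := by
                rw [pvSplit_cons_q, hs2]
              rw [hs]
              simp only [List.headI, List.tail_cons, List.append_nil]
              have hstop : pvBInner (parts0 ++ [pre]) ((c2 :: a) :: t)
                  = (parts0 ++ [pre], (c2 :: a) :: t) := by simp [pvBInner]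
              rw [hstop]
              exact ⟨by simp, Or.inr (by rw [hs2])⟩
  | case4 c rest hq ih =>
      -- l = c :: rest with c ≠ '\'' : an ordinary character of the literal
      intro parts0 pre
      have hc : c ≠ '\'' := hq
      cases hsp : rest.splitOn '\'' with
      | nil => exact absurd hsp (pvSplit_ne_nil rest)
      | cons a t =>
          rw [pvSplit_cons_ne c hc rest a t hsp]
          simp only [List.headI, List.tail_cons]
          have hih := ih parts0 (pre ++ [c])
          rw [hsp] at hih
          simp only [List.headI, List.tail_cons, List.append_assoc, List.singleton_append] at hih ⊢
          refine ⟨?_, hih.2⟩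
          rw [hih.1]
          rw [pvJ_snoc_append parts0 pre [c]]
          simp

-- outer correspondence
theorem pvOuter_eq (l : List Char) : pvAOuter l = pvBOuter ((l.splitOn '\'').drop 1) := by
  fun_induction pvAOuter l with
  | case1 => simp [List.splitOn, pvBOuter]
  | case2 rest ih =>
      rw [pvSplit_cons_q, List.drop_one, List.tail_cons]
      cases h : rest.splitOn '\'' with
      | nil => exact absurd h (pvSplit_ne_nil rest)
      | cons hd t =>
          rw [pvBOuter]
          have hspec := pvBInner_spec rest [] []
          rw [h] at hspec
          simp only [List.headI, List.tail_cons, List.nil_append] at hspec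
          rw [pvAInner_eq rest []] at ih ⊢
          simp only [List.nil_append]
          have hhead : String.ofList ((pvLit rest).1, (pvLit rest).2).1
              = String.ofList (PySem.Chars.join ['\''] (pvBInner [hd] t).1) := by
            rw [PySem.Chars.join, hspec.1]
            simp [List.intercalate]
          have htail : pvAOuter ((pvLit rest).1, (pvLit rest).2).2
              = pvBOuter (List.drop 1 (pvBInner [hd] t).2) := by
            rcases hspec.2 with ⟨h1, h2⟩ | h1
            · rw [h1, h2]
              simp [pvAOuter, pvBOuter]
            · rw [h1]
              simpa using ih
          rw [← hhead, ← htail]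
  | case3 c rest hc ih =>
      cases h : rest.splitOn '\'' with
      | nil => exact absurd h (pvSplit_ne_nil rest)
      | cons a t =>
          rw [pvSplit_cons_ne c hc rest a t h, ih, h]
          simp

-- ===== VERDICT (by name: the statement is the Claim_ definition above) =====
theorem extract_string_literals_spec : Claim_equal_extract_string_literals := by
  intro body _
  unfold Spec_extract_string_literals extract_string_literals extract_string_literals_alt
  rw [pvSplitOn_eq, pvOuter_eq]
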